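-- pv_equiv track=rewrite | github.com/Avi-222005/Cybershield | services/tech_fingerprint_engine.py | _section_from_categories
-- ===== SOURCE A (Python) =====
-- from typing import Any, Dict, List, Optional, Tuple
--
-- def _section_from_categories(categories: List[str], name: str) -> str:
--     lowered_name = str(name or "").lower()
--     lowered = [str(category).lower() for category in categories]
--
--     if any(token in lowered_name for token in ("wordpress", "drupal", "joomla", "shopify", "magento")):
--         return "CMS"
--     if any(token in lowered_name for token in ("nginx", "apache", "iis", "litespeed", "openresty", "cloudflare")):
--         return "Server"
--
--     if any("security" in category or "privacy" in category for category in lowered):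
--         return "Security"
--     if any("analytics" in category or "marketing" in category for category in lowered):
--         return "Analytics"
--     if any("payment" in category for category in lowered):
--         return "Payment"
--     if any("hosting" in category for category in lowered):
--         return "Hosting"
--     if any("cms" in category or "blog" in category or "ecommerce" in category for category in lowered):
--         return "CMS"
--     if any("web server" in category or "cdn" in category or "server" in category for category in lowered):
--         return "Server"
--     if any("programming" in category or "database" in category for category in lowered):
--         return "Backend"
--     if any("framework" in category or "javascript" in category or "font" in category or "web development" in category for category in lowered):
--         return "Frontend"
--
--     return "Other"
-- ===== SOURCE B (Python) =====
-- _SECTION_KEYWORDS = [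
--     ("Security", ("security", "privacy")),
--     ("Analytics", ("analytics", "marketing")),
--     ("Payment", ("payment",)),
--     ("Hosting", ("hosting",)),
--     ("CMS", ("cms", "blog", "ecommerce")),
--     ("Server", ("web server", "cdn", "server")),
--     ("Backend", ("programming", "database")),
--     ("Frontend", ("framework", "javascript", "font", "web development")),
-- ]
--
-- _PRIORITY = ("Security", "Analytics", "Payment", "Hosting", "CMS", "Server", "Backend", "Frontend")
--
--
-- def _section_from_categories(categories, name):
--     lowered_name = str(name or "").lower()
--
--     if any(token in lowered_name for token in ("wordpress", "drupal", "joomla", "shopify", "magento")):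
--         return "CMS"
--     if any(token in lowered_name for token in ("nginx", "apache", "iis", "litespeed", "openresty", "cloudflare")):
--         return "Server"
--
--     matched = set()
--     for category in categories:
--         lowered = str(category).lower()
--         for section, keywords in _SECTION_KEYWORDS:
--             if any(keyword in lowered for keyword in keywords):
--                 matched.add(section)
--
--     for section in _PRIORITY:
--         if section in matched:
--             return section
--     return "Other"
-- ===== Notes on version B (the rewrite author's own statement) =====
-- stated objective: alternative
-- what changed: B replaces A's eight sequential any()-scans over the categories with a single pass that indexes every category against a keyword-to-section table into a matched set, then returns the first matched section of a fixed priority list.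
import Mathlib
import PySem

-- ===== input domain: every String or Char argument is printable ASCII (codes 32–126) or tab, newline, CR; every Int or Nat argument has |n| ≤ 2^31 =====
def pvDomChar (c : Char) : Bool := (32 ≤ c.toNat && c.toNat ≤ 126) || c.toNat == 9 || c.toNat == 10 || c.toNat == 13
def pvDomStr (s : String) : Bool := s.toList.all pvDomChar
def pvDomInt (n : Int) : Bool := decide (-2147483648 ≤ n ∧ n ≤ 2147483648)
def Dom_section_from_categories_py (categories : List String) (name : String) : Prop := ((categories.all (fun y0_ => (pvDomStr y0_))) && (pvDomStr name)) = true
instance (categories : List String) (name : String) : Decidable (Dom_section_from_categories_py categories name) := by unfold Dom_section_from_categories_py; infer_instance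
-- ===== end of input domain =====

-- B builds the matched-section set in one pass over the categories and reads it back through a
-- fixed priority list, instead of A's eight sequential any()-scans. Equivalence of the return value.

-- ===== PORT A =====
def section_from_categories_py (categories : List String) (name : String) : String :=
  let loweredName := PySem.Str.lower name
  let lowered := categories.map (fun category => PySem.Str.lower category)
  if ["wordpress", "drupal", "joomla", "shopify", "magento"].any
      (fun token => PySem.Str.isIn token loweredName) then "CMS"
  else if ["nginx", "apache", "iis", "litespeed", "openresty", "cloudflare"].any
      (fun token => PySem.Str.isIn token loweredName) then "Server"
  else if lowered.any (fun c => PySem.Str.isIn "security" c || PySem.Str.isIn "privacy" c) then "Security"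
  else if lowered.any (fun c => PySem.Str.isIn "analytics" c || PySem.Str.isIn "marketing" c) then "Analytics"
  else if lowered.any (fun c => PySem.Str.isIn "payment" c) then "Payment"
  else if lowered.any (fun c => PySem.Str.isIn "hosting" c) then "Hosting"
  else if lowered.any (fun c => PySem.Str.isIn "cms" c || PySem.Str.isIn "blog" c || PySem.Str.isIn "ecommerce" c) then "CMS"
  else if lowered.any (fun c => PySem.Str.isIn "web server" c || PySem.Str.isIn "cdn" c || PySem.Str.isIn "server" c) then "Server"
  else if lowered.any (fun c => PySem.Str.isIn "programming" c || PySem.Str.isIn "database" c) then "Backend"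
  else if lowered.any (fun c => PySem.Str.isIn "framework" c || PySem.Str.isIn "javascript" c || PySem.Str.isIn "font" c || PySem.Str.isIn "web development" c) then "Frontend"
  else "Other"

-- ===== PORT B =====
def sfcTable : List (String × List String) :=
  [("Security", ["security", "privacy"]),
   ("Analytics", ["analytics", "marketing"]),
   ("Payment", ["payment"]),
   ("Hosting", ["hosting"]),
   ("CMS", ["cms", "blog", "ecommerce"]),
   ("Server", ["web server", "cdn", "server"]),
   ("Backend", ["programming", "database"]),
   ("Frontend", ["framework", "javascript", "font", "web development"])]

def sfcPriority : List String :=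
  ["Security", "Analytics", "Payment", "Hosting", "CMS", "Server", "Backend", "Frontend"]

-- the inner 'for section, keywords in _SECTION_KEYWORDS' loop of B, for one lowered category
def sfcStep (m : PySem.Set String) (lowered : String) : PySem.Set String :=
  sfcTable.foldl
    (fun m p => if p.2.any (fun keyword => PySem.Str.isIn keyword lowered) then PySem.Set.add m p.1 else m) m

def sfcMatched (categories : List String) : PySem.Set String :=
  categories.foldl (fun m category => sfcStep m (PySem.Str.lower category)) PySem.Set.empty

def section_from_categories_py_alt (categories : List String) (name : String) : String :=
  let loweredName := PySem.Str.lower name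
  if ["wordpress", "drupal", "joomla", "shopify", "magento"].any
      (fun token => PySem.Str.isIn token loweredName) then "CMS"
  else if ["nginx", "apache", "iis", "litespeed", "openresty", "cloudflare"].any
      (fun token => PySem.Str.isIn token loweredName) then "Server"
  else
    let matched := sfcMatched categories
    (sfcPriority.find? (fun s => PySem.Set.contains matched s)).getD "Other"

-- ===== PRECONDITION & SPEC =====
def Spec_section_from_categories_py (categories : List String) (name : String) (out : String) : Prop := out = section_from_categories_py_alt categories name
instance (categories : List String) (name : String) (out : String) : Decidable (Spec_section_from_categories_py categories name out) := by unfold Spec_section_from_categories_py; infer_instance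

-- ===== CLAIM (what is proved, stated in full; the proofs are below) =====
def Claim_equal_section_from_categories_py : Prop := ∀ (categories : List String) (name : String), Dom_section_from_categories_py categories name → Spec_section_from_categories_py categories name (section_from_categories_py categories name)

-- ===== LEMMAS AND PROOFS =====

theorem mem_foldl_addif (t : List (String × List String)) (m : PySem.Set String)
    (c : String) (S : String) :
    S ∈ t.foldl (fun m p => if p.2.any (fun k => PySem.Str.isIn k c) then PySem.Set.add m p.1 else m) m ↔
      S ∈ m ∨ ∃ p ∈ t, p.1 = S ∧ p.2.any (fun k => PySem.Str.isIn k c) = true := by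
  induction t generalizing m with
  | nil => simp
  | cons p t ih =>
    rw [List.foldl_cons]
    by_cases h : (p.2.any (fun k => PySem.Str.isIn k c)) = true
    · rw [if_pos h, ih]
      simp only [PySem.Set.mem_add, List.exists_mem_cons_iff, h, and_true]
      constructor
      · rintro ((hm | rfl) | h')
        · exact Or.inl hm
        · exact Or.inr (Or.inl rfl)
        · exact Or.inr (Or.inr h')
      · rintro (hm | (rfl | h'))
        · exact Or.inl (Or.inl hm)
        · exact Or.inl (Or.inr rfl)
        · exact Or.inr h'
    · rw [if_neg h, ih, List.exists_mem_cons_iff]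
      tauto

theorem mem_sfcMatched (categories : List String) (S : String) :
    S ∈ sfcMatched categories ↔
      ∃ cat ∈ categories, ∃ p ∈ sfcTable, p.1 = S ∧
        p.2.any (fun k => PySem.Str.isIn k (PySem.Str.lower cat)) = true := by
  unfold sfcMatched
  suffices h : ∀ m, S ∈ categories.foldl (fun m category => sfcStep m (PySem.Str.lower category)) m ↔
      S ∈ m ∨ ∃ cat ∈ categories, ∃ p ∈ sfcTable, p.1 = S ∧
        p.2.any (fun k => PySem.Str.isIn k (PySem.Str.lower cat)) = true by
    rw [h PySem.Set.empty]; simp [PySem.Set.empty]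
  intro m
  induction categories generalizing m with
  | nil => simp
  | cons cat cats ih =>
    rw [List.foldl_cons, ih, sfcStep, mem_foldl_addif]
    simp only [List.exists_mem_cons_iff]
    rw [or_assoc]

theorem contains_security (categories : List String) :
    PySem.Set.contains (sfcMatched categories) "Security" =
      categories.any (fun cat => PySem.Str.isIn "security" (PySem.Str.lower cat) || PySem.Str.isIn "privacy" (PySem.Str.lower cat)) := by
  rw [Bool.eq_iff_iff, PySem.Set.contains_iff, mem_sfcMatched, List.any_eq_true]
  simp [sfcTable]

theorem contains_analytics (categories : List String) :
    PySem.Set.contains (sfcMatched categories) "Analytics" =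
      categories.any (fun cat => PySem.Str.isIn "analytics" (PySem.Str.lower cat) || PySem.Str.isIn "marketing" (PySem.Str.lower cat)) := by
  rw [Bool.eq_iff_iff, PySem.Set.contains_iff, mem_sfcMatched, List.any_eq_true]
  simp [sfcTable]

theorem contains_payment (categories : List String) :
    PySem.Set.contains (sfcMatched categories) "Payment" =
      categories.any (fun cat => PySem.Str.isIn "payment" (PySem.Str.lower cat)) := by
  rw [Bool.eq_iff_iff, PySem.Set.contains_iff, mem_sfcMatched, List.any_eq_true]
  simp [sfcTable]

theorem contains_hosting (categories : List String) :
    PySem.Set.contains (sfcMatched categories) "Hosting" =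
      categories.any (fun cat => PySem.Str.isIn "hosting" (PySem.Str.lower cat)) := by
  rw [Bool.eq_iff_iff, PySem.Set.contains_iff, mem_sfcMatched, List.any_eq_true]
  simp [sfcTable]

theorem contains_cms (categories : List String) :
    PySem.Set.contains (sfcMatched categories) "CMS" =
      categories.any (fun cat => PySem.Str.isIn "cms" (PySem.Str.lower cat) || PySem.Str.isIn "blog" (PySem.Str.lower cat) || PySem.Str.isIn "ecommerce" (PySem.Str.lower cat)) := by
  rw [Bool.eq_iff_iff, PySem.Set.contains_iff, mem_sfcMatched, List.any_eq_true]
  simp [sfcTable]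
  exact exists_congr fun cat => and_congr_right fun _ => by tauto

theorem contains_server (categories : List String) :
    PySem.Set.contains (sfcMatched categories) "Server" =
      categories.any (fun cat => PySem.Str.isIn "web server" (PySem.Str.lower cat) || PySem.Str.isIn "cdn" (PySem.Str.lower cat) || PySem.Str.isIn "server" (PySem.Str.lower cat)) := by
  rw [Bool.eq_iff_iff, PySem.Set.contains_iff, mem_sfcMatched, List.any_eq_true]
  simp [sfcTable]
  exact exists_congr fun cat => and_congr_right fun _ => by tauto

theorem contains_backend (categories : List String) :
    PySem.Set.contains (sfcMatched categories) "Backend" =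
      categories.any (fun cat => PySem.Str.isIn "programming" (PySem.Str.lower cat) || PySem.Str.isIn "database" (PySem.Str.lower cat)) := by
  rw [Bool.eq_iff_iff, PySem.Set.contains_iff, mem_sfcMatched, List.any_eq_true]
  simp [sfcTable]

theorem contains_frontend (categories : List String) :
    PySem.Set.contains (sfcMatched categories) "Frontend" =
      categories.any (fun cat => PySem.Str.isIn "framework" (PySem.Str.lower cat) || PySem.Str.isIn "javascript" (PySem.Str.lower cat) || PySem.Str.isIn "font" (PySem.Str.lower cat) || PySem.Str.isIn "web development" (PySem.Str.lower cat)) := by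
  rw [Bool.eq_iff_iff, PySem.Set.contains_iff, mem_sfcMatched, List.any_eq_true]
  simp [sfcTable]
  exact exists_congr fun cat => and_congr_right fun _ => by tauto

theorem find_priority (m : PySem.Set String) :
    (sfcPriority.find? (fun s => PySem.Set.contains m s)).getD "Other" =
      (if PySem.Set.contains m "Security" then "Security"
       else if PySem.Set.contains m "Analytics" then "Analytics"
       else if PySem.Set.contains m "Payment" then "Payment"
       else if PySem.Set.contains m "Hosting" then "Hosting"
       else if PySem.Set.contains m "CMS" then "CMS"
       else if PySem.Set.contains m "Server" then "Server"
       else if PySem.Set.contains m "Backend" then "Backend"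
       else if PySem.Set.contains m "Frontend" then "Frontend"
       else "Other") := by
  unfold sfcPriority
  by_cases h0 : PySem.Set.contains m "Security" = true
  · rw [List.find?_cons_of_pos h0, if_pos h0]; rfl
  · rw [List.find?_cons_of_neg h0, if_neg h0]
    by_cases h1 : PySem.Set.contains m "Analytics" = true
    · rw [List.find?_cons_of_pos h1, if_pos h1]; rfl
    · rw [List.find?_cons_of_neg h1, if_neg h1]
      by_cases h2 : PySem.Set.contains m "Payment" = true
      · rw [List.find?_cons_of_pos h2, if_pos h2]; rfl
      · rw [List.find?_cons_of_neg h2, if_neg h2]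
        by_cases h3 : PySem.Set.contains m "Hosting" = true
        · rw [List.find?_cons_of_pos h3, if_pos h3]; rfl
        · rw [List.find?_cons_of_neg h3, if_neg h3]
          by_cases h4 : PySem.Set.contains m "CMS" = true
          · rw [List.find?_cons_of_pos h4, if_pos h4]; rfl
          · rw [List.find?_cons_of_neg h4, if_neg h4]
            by_cases h5 : PySem.Set.contains m "Server" = true
            · rw [List.find?_cons_of_pos h5, if_pos h5]; rfl
            · rw [List.find?_cons_of_neg h5, if_neg h5]
              by_cases h6 : PySem.Set.contains m "Backend" = true
              · rw [List.find?_cons_of_pos h6, if_pos h6]; rfl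
              · rw [List.find?_cons_of_neg h6, if_neg h6]
                by_cases h7 : PySem.Set.contains m "Frontend" = true
                · rw [List.find?_cons_of_pos h7, if_pos h7]; rfl
                · rw [List.find?_cons_of_neg h7, if_neg h7]
                  rfl

-- ===== VERDICT (by name: the statement is the Claim_ definition above) =====
theorem section_from_categories_py_spec : Claim_equal_section_from_categories_py := by
  intro categories name _
  simp only [Spec_section_from_categories_py, section_from_categories_py,
    section_from_categories_py_alt, List.any_map, Function.comp_def]
  rw [find_priority, contains_security, contains_analytics, contains_payment, contains_hosting,
    contains_cms, contains_server, contains_backend, contains_frontend]
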